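-- pv_equiv track=rewrite | github.com/elgrandt/LetterAnalysis | main.py | ordenar_letras
-- ===== SOURCE A (Python) =====
-- def ordenar_letras(letras):
--     lines = []
--     for x in range(len(letras)):
--         mxX = max(letras[x], key = lambda a: a[0])[0]
--         mxY = max(letras[x], key = lambda a: a[1])[1]
--         mnX = min(letras[x], key = lambda a: a[0])[0]
--         mnY = min(letras[x], key = lambda a: a[1])[1]
--         chosen = False
--         for y in range(len(lines)):
--             line = lines[y]
--             if ( mnY >= line[1][0] and mnY < line[1][1] ) or ( mxY > line[1][0] and mxY <= line[1][1] ):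
--                 lines[y][0].append(letras[x])
--                 chosen = True
--                 break
--         if not chosen:
--             lines.append([[letras[x]], [mnY,mxY]])
--     for x in range(len(lines)):
--         lines[x][0] = sorted(lines[x][0], key = lambda a: min(a, key = lambda a: a[0]))
--     lines = sorted(lines, key = lambda a: a[1][0])
--     lets = []
--     for x in lines:
--         lets += x[0]
--     return lets
-- ===== SOURCE B (Python) =====
-- def _insort(xs, item):
--     # insert keeping xs sorted (after any equal entries)
--     i = 0
--     while i < len(xs) and xs[i] <= item:
--         i += 1
--     xs.insert(i, item)
--
-- def ordenar_letras(letras):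
--     by_lo = []      # (lo, hi, line_id), kept sorted by lo; the scan prunes once lo > mxY
--     line_lo = []    # lo of each line, indexed by creation id
--     keyed = []      # ((line_lo, line_id, min_x, min_y), letter), one entry per letter
--     for letter in letras:
--         ys = [p[1] for p in letter]
--         mnY, mxY = min(ys), max(ys)
--         best = -1   # minimum id of an overlapping line = A's first-fit line
--         for lo, hi, lid in by_lo:
--             if lo > mxY:
--                 break
--             if (mnY >= lo and mnY < hi) or (mxY > lo and mxY <= hi):
--                 if best < 0 or lid < best:
--                     best = lid
--         if best < 0:
--             best = len(line_lo)
--             line_lo.append(mnY)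
--             _insort(by_lo, (mnY, mxY, best))
--         mn = min(letter, key=lambda p: p[0])
--         keyed.append(((line_lo[best], best, mn[0], mn[1]), letter))
--     keyed.sort(key=lambda e: e[0])   # one global sort on the composite key
--     return [e[1] for e in keyed]
-- ===== Notes on version B (the rewrite author's own statement) =====
-- stated objective: alternative
-- what changed: B assigns each letter a line by an argmin-of-creation-index scan over an interval list kept sorted by lo (pruned with break once lo exceeds the letter's max y) instead of A's first-fit scan of lines in creation order, and replaces A's per-line sorts, sort of the line list and concatenation by ONE stable sort of all letters on a composite key (line lo, line id, min-x pair).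
import Mathlib
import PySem

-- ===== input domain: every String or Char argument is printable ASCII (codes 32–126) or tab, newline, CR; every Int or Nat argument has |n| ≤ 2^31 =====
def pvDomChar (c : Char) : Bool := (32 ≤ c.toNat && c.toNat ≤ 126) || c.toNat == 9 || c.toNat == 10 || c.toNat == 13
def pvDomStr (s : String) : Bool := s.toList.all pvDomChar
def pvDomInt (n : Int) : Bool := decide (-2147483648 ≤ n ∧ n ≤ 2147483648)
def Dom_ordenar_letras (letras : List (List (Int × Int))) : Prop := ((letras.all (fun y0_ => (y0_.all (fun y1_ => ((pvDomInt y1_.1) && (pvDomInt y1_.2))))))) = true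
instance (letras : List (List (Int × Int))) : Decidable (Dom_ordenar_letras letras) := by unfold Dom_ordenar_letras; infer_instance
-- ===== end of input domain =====

-- B replaces A's first-fit scan of lines in creation order by an argmin scan over a lo-sorted
-- interval list (pruned once lo > mxY) and replaces A's per-line sorts + line sort + concatenation
-- by ONE sort on a composite key (line lo, line id, min-x pair) — alternative algorithm, same cost class.


-- ===== PORT A =====

-- first line whose interval overlaps (A's inner `for y in range(len(lines)) … break`);
-- the matched line gets the letter appended to its group
def pvPlace (letter : List (Int × Int)) (mnY mxY : Int) :
    List (List (List (Int × Int)) × (Int × Int)) →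
      Option (List (List (List (Int × Int)) × (Int × Int)))
  | [] => none
  | l :: rest =>
      if (mnY ≥ l.2.1 ∧ mnY < l.2.2) ∨ (mxY > l.2.1 ∧ mxY ≤ l.2.2) then
        some ((l.1 ++ [letter], l.2) :: rest)
      else (pvPlace letter mnY mxY rest).map (l :: ·)

-- min(a, key=lambda a: a[0]) — the pair with minimal x (first one); default never reached on Pre_
def pvMinp (a : List (Int × Int)) : Int × Int := (PySem.List.min? a (fun p => p.1)).getD (0, 0)

-- one iteration of A's first loop
def pvStepA (lines : List (List (List (Int × Int)) × (Int × Int)))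
    (letter : List (Int × Int)) : List (List (List (Int × Int)) × (Int × Int)) :=
  let _mxX := ((PySem.List.max? letter (fun a => a.1)).getD (0, 0)).1
  let mxY := ((PySem.List.max? letter (fun a => a.2)).getD (0, 0)).2
  let _mnX := ((PySem.List.min? letter (fun a => a.1)).getD (0, 0)).1
  let mnY := ((PySem.List.min? letter (fun a => a.2)).getD (0, 0)).2
  match pvPlace letter mnY mxY lines with
  | some ls => ls
  | none => lines ++ [([letter], (mnY, mxY))]

def pvLinesA (letras : List (List (Int × Int))) :
    List (List (List (Int × Int)) × (Int × Int)) :=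
  letras.foldl pvStepA []

def ordenar_letras (letras : List (List (Int × Int))) : List (List (Int × Int)) :=
  let lines := pvLinesA letras
  let lines2 := lines.map (fun l =>
    (PySem.List.sorted2 l.1 (fun a => (pvMinp a).1) (fun a => (pvMinp a).2), l.2))
  let lines3 := PySem.List.sorted lines2 (fun l => l.2.1)
  lines3.foldl (fun acc l => acc ++ l.1) []

-- ===== PORT B =====

-- Python tuple '<=' on the (lo, hi, id) triples (_insort's `xs[i] <= item`)
def pvLe3 (a b : Int × Int × Int) : Bool :=
  decide (a.1 < b.1) || (a.1 == b.1 && (decide (a.2.1 < b.2.1) || (a.2.1 == b.2.1 &&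
    (decide (a.2.2 < b.2.2) || a.2.2 == b.2.2))))

-- Python tuple '<' on the 4-tuple sort keys
def pvLtK (a b : Int × Int × Int × Int) : Bool :=
  decide (a.1 < b.1) || (a.1 == b.1 && (decide (a.2.1 < b.2.1) || (a.2.1 == b.2.1 &&
    (decide (a.2.2.1 < b.2.2.1) || (a.2.2.1 == b.2.2.1 && decide (a.2.2.2 < b.2.2.2))))))

-- _insort: walk past entries <= item, insert there (keeps by_lo sorted)
def pvInsort (xs : List (Int × Int × Int)) (item : Int × Int × Int) : List (Int × Int × Int) :=
  match xs with
  | [] => [item]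
  | y :: rest => if pvLe3 y item then y :: pvInsort rest item else item :: y :: rest

-- B's pruned scan of the lo-sorted interval list: min line id among overlapping ones, -1 if none
def pvBScan (mnY mxY : Int) : List (Int × Int × Int) → Int → Int
  | [], best => best
  | e :: rest, best =>
    if e.1 > mxY then best
    else pvBScan mnY mxY rest
      (if (mnY ≥ e.1 ∧ mnY < e.2.1) ∨ (mxY > e.1 ∧ mxY ≤ e.2.1) then
        (if best < 0 ∨ e.2.2 < best then e.2.2 else best)
       else best)

-- one iteration of B's loop; state = (by_lo, line_lo, keyed)
def pvStepB (st : List (Int × Int × Int) × List Int × List ((Int × Int × Int × Int) × List (Int × Int)))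
    (letter : List (Int × Int)) :
    List (Int × Int × Int) × List Int × List ((Int × Int × Int × Int) × List (Int × Int)) :=
  let ys := letter.map (fun p => p.2)
  let mnY := (PySem.List.min? ys (fun a => a)).getD 0
  let mxY := (PySem.List.max? ys (fun a => a)).getD 0
  let b0 := pvBScan mnY mxY st.1 (-1)
  let best := if b0 < 0 then (st.2.1.length : Int) else b0
  let line_lo := if b0 < 0 then st.2.1 ++ [mnY] else st.2.1
  let by_lo := if b0 < 0 then pvInsort st.1 (mnY, mxY, best) else st.1
  let mn := (PySem.List.min? letter (fun p => p.1)).getD (0, 0)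
  (by_lo, line_lo,
    st.2.2 ++ [((PySem.List.pyGetD line_lo best 0, best, mn.1, mn.2), letter)])

def ordenar_letras_alt (letras : List (List (Int × Int))) : List (List (Int × Int)) :=
  let st := letras.foldl pvStepB ([], [], [])
  -- keyed.sort(key=lambda e: e[0]): stable insertion sort comparing the 4-tuple keys (Python tuple '<')
  let sk := st.2.2.foldl (fun acc e => PySem.List.insertBy (fun a b => pvLtK a.1 b.1) e acc) []
  sk.map (fun e => e.2)

-- ===== PRECONDITION & SPEC =====
-- Pre_ excludes inputs containing an empty letter (an empty inner list): Python A raises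
-- ValueError on max of an empty sequence there, and B likewise raises ValueError on min.
def Pre_ordenar_letras (letras : List (List (Int × Int))) : Prop := ∀ l ∈ letras, l ≠ []
instance (letras : List (List (Int × Int))) : Decidable (Pre_ordenar_letras letras) := by
  unfold Pre_ordenar_letras; infer_instance

def pvWitness_ordenar_letras : (List (List (Int × Int))) := [[(0, 0)], [(1, 5), (2, 4)]]

def Spec_ordenar_letras (letras : List (List (Int × Int))) (out : List (List (Int × Int))) : Prop := out = ordenar_letras_alt letras
instance (letras : List (List (Int × Int))) (out : List (List (Int × Int))) : Decidable (Spec_ordenar_letras letras out) := by unfold Spec_ordenar_letras; infer_instance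

-- ===== CLAIM (what is proved, stated in full; the proofs are below) =====
def Claim_equal_ordenar_letras : Prop := ∀ (letras : List (List (Int × Int))), Dom_ordenar_letras letras → Pre_ordenar_letras letras → Spec_ordenar_letras letras (ordenar_letras letras)

-- ===== LEMMAS AND PROOFS =====

theorem pv_witness_ok :
    Dom_ordenar_letras pvWitness_ordenar_letras ∧ Pre_ordenar_letras pvWitness_ordenar_letras := by
  constructor
  · decide
  · intro l hl
    fin_cases hl <;> simp


-- ---- generic insertion-sort toolkit (PySem sorts are foldl insertBy) ----

def pvIsort {α : Type} (b : α → α → Bool) (xs : List α) : List α :=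
  xs.foldl (fun acc x => PySem.List.insertBy b x acc) []

def pvLtOk {α : Type} (b : α → α → Bool) : Prop :=
  (∀ x y z, b x y = true → b z y = false → b x z = true) ∧ ∀ x y, b x y = true → b y x = false

def pvSrt {α : Type} (b : α → α → Bool) (l : List α) : Prop :=
  l.Pairwise (fun a c => b c a = false)

theorem pv_sorted2_eq_isort {α κ₁ κ₂ : Type} [LT κ₁] [DecidableLT κ₁] [LT κ₂] [DecidableLT κ₂]
    (xs : List α) (k1 : α → κ₁) (k2 : α → κ₂) :
    PySem.List.sorted2 xs k1 k2 false =
      pvIsort (fun a c => decide (k1 a < k1 c) || (!decide (k1 c < k1 a) && decide (k2 a < k2 c))) xs := rfl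

theorem pv_insertBy_all {α : Type} (b : α → α → Bool) (x : α) (l : List α)
    (h : ∀ z ∈ l, b x z = true) : PySem.List.insertBy b x l = x :: l := by
  cases l with
  | nil => rfl
  | cons y ys => simp [PySem.List.insertBy, h y (by simp)]

theorem pvSrt_insertBy {α : Type} {b : α → α → Bool} (hok : pvLtOk b) {acc : List α} (x : α)
    (h : pvSrt b acc) : pvSrt b (PySem.List.insertBy b x acc) := by
  induction acc with
  | nil => simp [PySem.List.insertBy, pvSrt]
  | cons y ys ih =>
    rw [pvSrt, List.pairwise_cons] at h
    by_cases hxy : b x y = true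
    · simp only [PySem.List.insertBy, hxy, if_pos]
      refine List.Pairwise.cons ?_ (List.Pairwise.cons h.1 h.2)
      intro m hm
      rw [List.mem_cons] at hm
      rcases hm with rfl | hm
      · exact hok.2 x m hxy
      · exact hok.2 x m (hok.1 x y m hxy (h.1 m hm))
    · simp only [PySem.List.insertBy, hxy, if_neg, Bool.not_eq_true]
      refine List.Pairwise.cons ?_ (ih h.2)
      intro m hm
      rw [PySem.List.mem_insertBy] at hm
      rcases hm with rfl | hm
      · simpa using hxy
      · exact h.1 m hm

theorem pv_map_insertBy {α β : Type} (b : β → β → Bool) (f : α → β) (x : α) (l : List α) :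
    PySem.List.insertBy b (f x) (l.map f) = (PySem.List.insertBy (fun a c => b (f a) (f c)) x l).map f := by
  induction l with
  | nil => rfl
  | cons y ys ih =>
    by_cases h : b (f x) (f y) = true <;> simp [PySem.List.insertBy, h, ih]

theorem pv_congr_insertBy {α : Type} {b b' : α → α → Bool} {x : α} {l : List α}
    (h : ∀ y ∈ l, b x y = b' x y) : PySem.List.insertBy b x l = PySem.List.insertBy b' x l := by
  induction l with
  | nil => rfl
  | cons y ys ih =>
    have hy := h y (by simp)
    by_cases hb : b x y = true <;>
      simp_all [PySem.List.insertBy, fun z hz => h z (List.mem_cons_of_mem _ hz)]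

theorem pvIsort_map_aux {α β : Type} (b : β → β → Bool) (f : α → β) :
    ∀ (xs acc : List α),
      (xs.map f).foldl (fun acc x => PySem.List.insertBy b x acc) (acc.map f) =
        (xs.foldl (fun acc x => PySem.List.insertBy (fun a c => b (f a) (f c)) x acc) acc).map f := by
  intro xs
  induction xs with
  | nil => intro acc; rfl
  | cons x xs ih =>
    intro acc
    simp only [List.map_cons, List.foldl_cons]
    rw [pv_map_insertBy, ih]

theorem pvIsort_map {α β : Type} (b : β → β → Bool) (f : α → β) (xs : List α) :
    pvIsort b (xs.map f) = (pvIsort (fun a c => b (f a) (f c)) xs).map f := by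
  simpa using pvIsort_map_aux b f xs []

theorem pvIsort_congr_aux {α : Type} {b b' : α → α → Bool} (P : α → Prop)
    (hag : ∀ a c, P a → P c → b a c = b' a c) :
    ∀ (xs acc : List α), (∀ x ∈ xs, P x) → (∀ a ∈ acc, P a) →
      xs.foldl (fun acc x => PySem.List.insertBy b x acc) acc =
        xs.foldl (fun acc x => PySem.List.insertBy b' x acc) acc := by
  intro xs
  induction xs with
  | nil => intro acc _ _; rfl
  | cons x xs ih =>
    intro acc hxs hacc
    simp only [List.foldl_cons]
    have hx : P x := hxs x (by simp)
    rw [pv_congr_insertBy (fun y hy => hag x y hx (hacc y hy))]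
    refine ih _ (fun z hz => hxs z (List.mem_cons_of_mem _ hz)) ?_
    intro a ha
    rw [PySem.List.mem_insertBy] at ha
    rcases ha with rfl | ha
    · exact hx
    · exact hacc a ha

theorem pvIsort_congr {α : Type} {b b' : α → α → Bool} (P : α → Prop)
    (hag : ∀ a c, P a → P c → b a c = b' a c) (xs : List α) (hxs : ∀ x ∈ xs, P x) :
    pvIsort b xs = pvIsort b' xs :=
  pvIsort_congr_aux P hag xs [] hxs (by simp)

theorem pvIsort_mem_aux {α : Type} (b : α → α → Bool) :
    ∀ (xs acc : List α) (x : α),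
      x ∈ xs.foldl (fun acc x => PySem.List.insertBy b x acc) acc → x ∈ acc ∨ x ∈ xs := by
  intro xs
  induction xs with
  | nil => intro acc x h; exact Or.inl h
  | cons y ys ih =>
    intro acc x h
    simp only [List.foldl_cons] at h
    rcases ih _ x h with h' | h'
    · rw [PySem.List.mem_insertBy] at h'
      rcases h' with rfl | h'
      · exact Or.inr (by simp)
      · exact Or.inl h'
    · exact Or.inr (List.mem_cons_of_mem _ h')

theorem pvIsort_mem {α : Type} (b : α → α → Bool) (xs : List α) (x : α)
    (h : x ∈ pvIsort b xs) : x ∈ xs := by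
  rcases pvIsort_mem_aux b xs [] x h with h' | h'
  · simp at h'
  · exact h'

theorem pv_insertBy_perm {α : Type} (b : α → α → Bool) (x : α) (l : List α) :
    (PySem.List.insertBy b x l).Perm (x :: l) := by
  induction l with
  | nil => simp [PySem.List.insertBy]
  | cons y ys ih =>
    by_cases h : b x y = true
    · simp [PySem.List.insertBy, h]
    · simp only [PySem.List.insertBy, h, if_neg, Bool.not_eq_true]
      exact (List.Perm.cons y ih).trans (List.Perm.swap x y ys)

theorem pvIsort_perm_aux {α : Type} (b : α → α → Bool) :
    ∀ (xs acc : List α),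
      (xs.foldl (fun acc x => PySem.List.insertBy b x acc) acc).Perm (acc ++ xs) := by
  intro xs
  induction xs with
  | nil => intro acc; simp
  | cons x xs ih =>
    intro acc
    simp only [List.foldl_cons]
    refine (ih _).trans ?_
    refine (List.Perm.append_right xs (pv_insertBy_perm b x acc)).trans ?_
    exact List.perm_middle.symm.trans (by simp [List.Perm.refl])

theorem pvIsort_perm {α : Type} (b : α → α → Bool) (xs : List α) :
    (pvIsort b xs).Perm xs := by
  simpa using pvIsort_perm_aux b xs []

-- ---- min/max folds: A's pair-min by snd vs B's min over the mapped snd list ----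

theorem pv_foldl_opt_min {α κ : Type} [LT κ] [DecidableLT κ] (f : α → κ) :
    ∀ (t : List α) (h : α),
      t.foldl (fun acc x => match acc with
        | none => some x
        | some m => if f x < f m then some x else some m) (some h) =
      some (t.foldl (fun m x => if f x < f m then x else m) h) := by
  intro t
  induction t with
  | nil => intro h; rfl
  | cons x xs ih =>
    intro h
    simp only [List.foldl_cons]
    by_cases hc : f x < f h <;> simp [hc, ih]

theorem pv_foldl_opt_max {α κ : Type} [LT κ] [DecidableLT κ] (f : α → κ) :
    ∀ (t : List α) (h : α),
      t.foldl (fun acc x => match acc with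
        | none => some x
        | some m => if f m < f x then some x else some m) (some h) =
      some (t.foldl (fun m x => if f m < f x then x else m) h) := by
  intro t
  induction t with
  | nil => intro h; rfl
  | cons x xs ih =>
    intro h
    simp only [List.foldl_cons]
    by_cases hc : f h < f x <;> simp [hc, ih]

theorem pv_min?_cons {α κ : Type} [LT κ] [DecidableLT κ] (f : α → κ) (h : α) (t : List α) :
    PySem.List.min? (h :: t) f = some (t.foldl (fun m x => if f x < f m then x else m) h) := by
  simp only [PySem.List.min?, List.foldl_cons]
  exact pv_foldl_opt_min f t h

theorem pv_max?_cons {α κ : Type} [LT κ] [DecidableLT κ] (f : α → κ) (h : α) (t : List α) :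
    PySem.List.max? (h :: t) f = some (t.foldl (fun m x => if f m < f x then x else m) h) := by
  simp only [PySem.List.max?, List.foldl_cons]
  exact pv_foldl_opt_max f t h

theorem pv_snd_foldl_min : ∀ (t : List (Int × Int)) (h : Int × Int),
    (t.foldl (fun m x => if x.2 < m.2 then x else m) h).2 =
      (t.map (fun p => p.2)).foldl (fun m y => if y < m then y else m) h.2 := by
  intro t
  induction t with
  | nil => intro h; rfl
  | cons x xs ih =>
    intro h
    simp only [List.foldl_cons, List.map_cons]
    by_cases hc : x.2 < h.2 <;> simp [hc, ih]

theorem pv_snd_foldl_max : ∀ (t : List (Int × Int)) (h : Int × Int),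
    (t.foldl (fun m x => if m.2 < x.2 then x else m) h).2 =
      (t.map (fun p => p.2)).foldl (fun m y => if m < y then y else m) h.2 := by
  intro t
  induction t with
  | nil => intro h; rfl
  | cons x xs ih =>
    intro h
    simp only [List.foldl_cons, List.map_cons]
    by_cases hc : h.2 < x.2 <;> simp [hc, ih]

-- B's min(ys)/max(ys) equal the snd of A's min/max over the pairs
theorem pv_ys_min (letter : List (Int × Int)) (hne : letter ≠ []) :
    (PySem.List.min? (letter.map (fun p => p.2)) (fun a => a)).getD 0 =
      ((PySem.List.min? letter (fun a => a.2)).getD (0, 0)).2 := by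
  cases letter with
  | nil => exact absurd rfl hne
  | cons h t =>
    rw [List.map_cons, pv_min?_cons, pv_min?_cons]
    simp only [Option.getD_some]
    exact (pv_snd_foldl_min t h).symm

theorem pv_ys_max (letter : List (Int × Int)) (hne : letter ≠ []) :
    (PySem.List.max? (letter.map (fun p => p.2)) (fun a => a)).getD 0 =
      ((PySem.List.max? letter (fun a => a.2)).getD (0, 0)).2 := by
  cases letter with
  | nil => exact absurd rfl hne
  | cons h t =>
    rw [List.map_cons, pv_max?_cons, pv_max?_cons]
    simp only [Option.getD_some]
    exact (pv_snd_foldl_max t h).symm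

theorem pv_mn_le_mx (letter : List (Int × Int)) (hne : letter ≠ []) :
    ((PySem.List.min? letter (fun a => a.2)).getD (0, 0)).2 ≤
      ((PySem.List.max? letter (fun a => a.2)).getD (0, 0)).2 := by
  cases letter with
  | nil => exact absurd rfl hne
  | cons h t =>
    rw [pv_min?_cons, pv_max?_cons]
    simp only [Option.getD_some]
    have hmin : ∀ (l : List (Int × Int)) (a : Int × Int),
        (l.foldl (fun m x => if x.2 < m.2 then x else m) a).2 ≤ a.2 := by
      intro l
      induction l with
      | nil => intro a; exact le_refl _
      | cons x xs ih =>
        intro a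
        simp only [List.foldl_cons]
        by_cases hc : x.2 < a.2
        · simp only [hc, if_pos]; exact le_trans (ih x) (le_of_lt hc)
        · simp only [hc, ite_false]; exact ih a
    have hmax : ∀ (l : List (Int × Int)) (a : Int × Int),
        a.2 ≤ (l.foldl (fun m x => if m.2 < x.2 then x else m) a).2 := by
      intro l
      induction l with
      | nil => intro a; exact le_refl _
      | cons x xs ih =>
        intro a
        simp only [List.foldl_cons]
        by_cases hc : a.2 < x.2
        · simp only [hc, if_pos]; exact le_trans (le_of_lt hc) (ih x)
        · simp only [hc, ite_false]; exact ih a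
    exact le_trans (hmin t h) (hmax t h)

-- ---- A's first-matching-line scan as an index search (proof-only tagging of A's lines) ----

def pvFindIv (mnY mxY : Int) : List (Int × Int) → Option Int
  | [] => none
  | iv :: rest =>
      if (mnY ≥ iv.1 ∧ mnY < iv.2) ∨ (mxY > iv.1 ∧ mxY ≤ iv.2) then some 0
      else (pvFindIv mnY mxY rest).map (· + 1)

def pvStepT (st : List (Int × Int) × List ((Int × Int) × Int × List (Int × Int)))
    (letter : List (Int × Int)) :
    List (Int × Int) × List ((Int × Int) × Int × List (Int × Int)) :=
  let mxY := ((PySem.List.max? letter (fun a => a.2)).getD (0, 0)).2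
  let mnY := ((PySem.List.min? letter (fun a => a.2)).getD (0, 0)).2
  match pvFindIv mnY mxY st.1 with
  | some i => (st.1, st.2 ++ [(pvMinp letter, i, letter)])
  | none => (st.1 ++ [(mnY, mxY)], st.2 ++ [(pvMinp letter, (st.1.length : Int), letter)])

def pvTag (letras : List (List (Int × Int))) :
    List (Int × Int) × List ((Int × Int) × Int × List (Int × Int)) :=
  letras.foldl pvStepT ([], [])

theorem pv_place_find (letter : List (Int × Int)) (mnY mxY : Int) :
    ∀ (lines : List (List (List (Int × Int)) × (Int × Int))),
      (pvFindIv mnY mxY (lines.map (fun l => l.2)) = none ∧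
        pvPlace letter mnY mxY lines = none) ∨
      ∃ (j : Nat) (hj : j < lines.length),
        pvFindIv mnY mxY (lines.map (fun l => l.2)) = some (j : Int) ∧
        pvPlace letter mnY mxY lines =
          some (lines.set j (lines[j].1 ++ [letter], lines[j].2)) := by
  intro lines
  induction lines with
  | nil => left; exact ⟨rfl, rfl⟩
  | cons l rest ih =>
    by_cases hc : (mnY ≥ l.2.1 ∧ mnY < l.2.2) ∨ (mxY > l.2.1 ∧ mxY ≤ l.2.2)
    · right
      refine ⟨0, by simp, ?_, ?_⟩
      · simp [pvFindIv, hc]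
      · simp [pvPlace, hc]
    · rcases ih with ⟨hf, hp⟩ | ⟨j, hj, hf, hp⟩
      · left
        constructor
        · simp [pvFindIv, hc, hf]
        · simp [pvPlace, hc, hp]
      · right
        refine ⟨j + 1, by simpa using hj, ?_, ?_⟩
        · simp [pvFindIv, hc, hf]
        · simp [pvPlace, hc, hp]

def pvInv (lines : List (List (List (Int × Int)) × (Int × Int)))
    (iv : List (Int × Int)) (tg : List ((Int × Int) × Int × List (Int × Int))) : Prop :=
  iv = lines.map (fun l => l.2) ∧
  (∀ (j : Nat) (hj : j < lines.length),
      lines[j].1 = (tg.filter (fun t => t.2.1 == (j : Int))).map (fun t => t.2.2)) ∧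
  (∀ t ∈ tg, 0 ≤ t.2.1 ∧ t.2.1 < (iv.length : Int) ∧ t.1 = pvMinp t.2.2)

theorem pv_inv_step (lines : List (List (List (Int × Int)) × (Int × Int)))
    (iv : List (Int × Int)) (tg : List ((Int × Int) × Int × List (Int × Int)))
    (letter : List (Int × Int)) (h : pvInv lines iv tg) :
    pvInv (pvStepA lines letter) (pvStepT (iv, tg) letter).1 (pvStepT (iv, tg) letter).2 := by
  obtain ⟨hiv, hgrp, htag⟩ := h
  have hlen : iv.length = lines.length := by rw [hiv]; simp
  set mnY := ((PySem.List.min? letter (fun a => a.2)).getD (0, 0)).2 with hmnY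
  set mxY := ((PySem.List.max? letter (fun a => a.2)).getD (0, 0)).2 with hmxY
  rcases pv_place_find letter mnY mxY lines with ⟨hf, hp⟩ | ⟨j, hj, hf, hp⟩
  · have hsa : pvStepA lines letter = lines ++ [([letter], (mnY, mxY))] := by
      simp only [pvStepA]; rw [hp]
    have hsb : pvStepT (iv, tg) letter =
        (iv ++ [(mnY, mxY)], tg ++ [(pvMinp letter, (iv.length : Int), letter)]) := by
      simp only [pvStepT]
      rw [hiv, hf]
    rw [hsa, hsb]
    refine ⟨by simp [hiv], ?_, ?_⟩
    · intro j hj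
      simp only [List.length_append, List.length_cons, List.length_nil] at hj
      rcases Nat.lt_or_ge j lines.length with hlt | hge
      · rw [List.getElem_append_left hlt, hgrp j hlt, List.filter_append]
        have hne2 : (iv.length : Int) ≠ (j : Int) := by
          rw [hlen]; exact_mod_cast Nat.ne_of_gt hlt
        have : List.filter (fun t => t.2.1 == (j : Int))
            [(pvMinp letter, (iv.length : Int), letter)] = [] := by
          simp [hne2]
        rw [this, List.append_nil]
      · have hje : j = lines.length := by omega
        subst hje
        rw [List.getElem_concat_length rfl]
        have h1 : List.filter (fun t => t.2.1 == (lines.length : Int)) tg = [] := by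
          rw [List.filter_eq_nil_iff]
          intro t ht
          have := (htag t ht).2.1
          simp only [beq_iff_eq]
          rw [hlen] at this
          omega
        rw [List.filter_append, h1]
        simp [hlen]
    · intro t ht
      rw [List.mem_append] at ht
      rcases ht with ht | ht
      · obtain ⟨h1, h2, h3⟩ := htag t ht
        refine ⟨h1, ?_, h3⟩
        simp only [List.length_append, List.length_cons, List.length_nil]
        push_cast
        omega
      · simp only [List.mem_singleton] at ht
        subst ht
        refine ⟨by positivity, ?_, rfl⟩
        simp only [List.length_append, List.length_cons, List.length_nil]
        push_cast
        omega
  · have hsa : pvStepA lines letter =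
        lines.set j (lines[j].1 ++ [letter], lines[j].2) := by
      simp only [pvStepA]; rw [hp]
    have hsb : pvStepT (iv, tg) letter =
        (iv, tg ++ [(pvMinp letter, (j : Int), letter)]) := by
      simp only [pvStepT]
      rw [hiv, hf]
    rw [hsa, hsb]
    refine ⟨?_, ?_, ?_⟩
    · rw [hiv, List.map_set]
      have hj' : j < (List.map (fun l => l.2) lines).length := by simpa using hj
      have heq : (lines[j].1 ++ [letter], lines[j].2).2 =
          (List.map (fun l => l.2) lines)[j]'hj' := by simp
      rw [heq, List.set_getElem_self]
    · intro i hi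
      have hi' : i < lines.length := by simpa using hi
      by_cases hij : i = j
      · subst hij
        rw [List.getElem_set_self, List.filter_append, List.map_append]
        have hfs : List.filter (fun t => t.2.1 == (i : Int))
            [(pvMinp letter, (i : Int), letter)] = [(pvMinp letter, (i : Int), letter)] := by
          simp
        rw [hfs, hgrp i hi']
        simp
      · rw [List.getElem_set_ne (Ne.symm hij), List.filter_append]
        have hcast : (j : Int) ≠ (i : Int) := by exact_mod_cast Ne.symm hij
        have hfs : List.filter (fun t => t.2.1 == (i : Int))
            [(pvMinp letter, (j : Int), letter)] = [] := by
          simp [hcast]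
        rw [hfs, List.append_nil, hgrp i hi']
    · intro t ht
      rw [List.mem_append] at ht
      rcases ht with ht | ht
      · exact htag t ht
      · simp only [List.mem_singleton] at ht
        subst ht
        refine ⟨by positivity, ?_, rfl⟩
        show (j : Int) < (iv.length : Int)
        rw [hlen]
        exact_mod_cast hj


-- ---- B's pruned argmin scan equals A's first-fit index search ----

def pvC (mnY mxY lo hi : Int) : Prop := (mnY ≥ lo ∧ mnY < hi) ∨ (mxY > lo ∧ mxY ≤ hi)

-- the same scan without the break (proof-only)
def pvScanAll (mnY mxY : Int) : List (Int × Int × Int) → Int → Int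
  | [], best => best
  | e :: rest, best =>
    pvScanAll mnY mxY rest
      (if (mnY ≥ e.1 ∧ mnY < e.2.1) ∨ (mxY > e.1 ∧ mxY ≤ e.2.1) then
        (if best < 0 ∨ e.2.2 < best then e.2.2 else best)
       else best)

theorem pv_scanAll_nomatch (mnY mxY : Int) :
    ∀ (S : List (Int × Int × Int)) (b : Int), (∀ e ∈ S, ¬ pvC mnY mxY e.1 e.2.1) →
      pvScanAll mnY mxY S b = b := by
  intro S
  induction S with
  | nil => intro b _; rfl
  | cons e rest ih =>
    intro b h
    have he : ¬ pvC mnY mxY e.1 e.2.1 := h e (by simp)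
    simp only [pvScanAll, pvC] at he ⊢
    rw [if_neg he]
    exact ih b (fun a ha => h a (List.mem_cons_of_mem _ ha))

theorem pv_bscan_eq_scanAll (mnY mxY : Int) (hmn : mnY ≤ mxY) :
    ∀ (S : List (Int × Int × Int)), S.Pairwise (fun a b => a.1 ≤ b.1) →
      ∀ b, pvBScan mnY mxY S b = pvScanAll mnY mxY S b := by
  intro S
  induction S with
  | nil => intro _ b; rfl
  | cons e rest ih =>
    intro hp b
    rw [List.pairwise_cons] at hp
    by_cases hbr : e.1 > mxY
    · have hc : ¬ ((mnY ≥ e.1 ∧ mnY < e.2.1) ∨ (mxY > e.1 ∧ mxY ≤ e.2.1)) := by omega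
      simp only [pvBScan, pvScanAll]
      rw [if_pos hbr, if_neg hc]
      refine (pv_scanAll_nomatch mnY mxY rest b ?_).symm
      intro a ha
      have := hp.1 a ha
      simp only [pvC]
      omega
    · simp only [pvBScan, pvScanAll]
      rw [if_neg hbr]
      exact ih hp.2 _

theorem pv_scanAll_spec (mnY mxY : Int) :
    ∀ (S : List (Int × Int × Int)) (b : Int), (∀ e ∈ S, 0 ≤ e.2.2) →
      (pvScanAll mnY mxY S b = b ∨
        ∃ e ∈ S, pvC mnY mxY e.1 e.2.1 ∧ e.2.2 = pvScanAll mnY mxY S b) ∧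
      (∀ e ∈ S, pvC mnY mxY e.1 e.2.1 → pvScanAll mnY mxY S b ≤ e.2.2) ∧
      (0 ≤ b → 0 ≤ pvScanAll mnY mxY S b ∧ pvScanAll mnY mxY S b ≤ b) ∧
      ((∃ e ∈ S, pvC mnY mxY e.1 e.2.1) → 0 ≤ pvScanAll mnY mxY S b) := by
  intro S
  induction S with
  | nil =>
    intro b _
    refine ⟨Or.inl rfl, by simp, fun h => ⟨h, le_refl b⟩, ?_⟩
    rintro ⟨e, he, -⟩
    simp at he
  | cons e rest ih =>
    intro b hS
    have hid : 0 ≤ e.2.2 := hS e (by simp)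
    have hS' : ∀ a ∈ rest, 0 ≤ a.2.2 := fun a ha => hS a (List.mem_cons_of_mem _ ha)
    by_cases hc : (mnY ≥ e.1 ∧ mnY < e.2.1) ∨ (mxY > e.1 ∧ mxY ≤ e.2.1)
    · set b' := if b < 0 ∨ e.2.2 < b then e.2.2 else b with hb'
      have hrw : pvScanAll mnY mxY (e :: rest) b = pvScanAll mnY mxY rest b' := by
        simp only [pvScanAll]
        rw [if_pos hc, ← hb']
      obtain ⟨ih1, ih2, ih3, ih4⟩ := ih b' hS'
      have hb'0 : 0 ≤ b' := by rw [hb']; split_ifs <;> omega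
      have hb'le : b' ≤ e.2.2 := by rw [hb']; split_ifs <;> omega
      have hr0 : 0 ≤ pvScanAll mnY mxY rest b' := (ih3 hb'0).1
      have hrle : pvScanAll mnY mxY rest b' ≤ b' := (ih3 hb'0).2
      rw [hrw]
      refine ⟨?_, ?_, ?_, fun _ => hr0⟩
      · rcases ih1 with h | ⟨a, ha, hca, hva⟩
        · by_cases hcase : b < 0 ∨ e.2.2 < b
          · right
            refine ⟨e, by simp, by simpa [pvC] using hc, ?_⟩
            rw [h, hb', if_pos hcase]
          · left
            rw [h, hb', if_neg hcase]
        · right; exact ⟨a, List.mem_cons_of_mem _ ha, hca, hva⟩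
      · intro a ha hca
        rcases List.mem_cons.mp ha with rfl | ha'
        · exact le_trans hrle hb'le
        · exact ih2 a ha' hca
      · intro hb0
        refine ⟨hr0, le_trans hrle ?_⟩
        rw [hb']; split_ifs <;> omega
    · have hrw : pvScanAll mnY mxY (e :: rest) b = pvScanAll mnY mxY rest b := by
        simp only [pvScanAll]
        rw [if_neg hc]
      obtain ⟨ih1, ih2, ih3, ih4⟩ := ih b hS'
      rw [hrw]
      refine ⟨?_, ?_, ih3, ?_⟩
      · rcases ih1 with h | ⟨a, ha, hca, hva⟩
        · exact Or.inl h
        · exact Or.inr ⟨a, List.mem_cons_of_mem _ ha, hca, hva⟩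
      · intro a ha hca
        rcases List.mem_cons.mp ha with rfl | ha'
        · exact absurd (by simpa [pvC] using hca) hc
        · exact ih2 a ha' hca
      · rintro ⟨a, ha, hca⟩
        rcases List.mem_cons.mp ha with rfl | ha'
        · exact absurd (by simpa [pvC] using hca) hc
        · exact ih4 ⟨a, ha', hca⟩

theorem pv_findIv_none (mnY mxY : Int) :
    ∀ (ivs : List (Int × Int)), pvFindIv mnY mxY ivs = none →
      ∀ iv ∈ ivs, ¬ pvC mnY mxY iv.1 iv.2 := by
  intro ivs
  induction ivs with
  | nil => intro _ iv hiv; simp at hiv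
  | cons v rest ih =>
    intro h iv hiv
    by_cases hc : (mnY ≥ v.1 ∧ mnY < v.2) ∨ (mxY > v.1 ∧ mxY ≤ v.2)
    · simp only [pvFindIv] at h
      rw [if_pos hc] at h
      simp at h
    · simp only [pvFindIv] at h
      rw [if_neg hc] at h
      rw [Option.map_eq_none_iff] at h
      rcases List.mem_cons.mp hiv with rfl | hiv'
      · simpa [pvC] using hc
      · exact ih h iv hiv'

theorem pv_findIv_some (mnY mxY : Int) :
    ∀ (ivs : List (Int × Int)) (k : Int), pvFindIv mnY mxY ivs = some k →
      ∃ (j : Nat) (hj : j < ivs.length), k = (j : Int) ∧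
        pvC mnY mxY (ivs[j]).1 (ivs[j]).2 ∧
        ∀ (m : Nat) (hm : m < j), ¬ pvC mnY mxY (ivs[m]'(hm.trans hj)).1 (ivs[m]'(hm.trans hj)).2 := by
  intro ivs
  induction ivs with
  | nil => intro k h; simp [pvFindIv] at h
  | cons v rest ih =>
    intro k h
    by_cases hc : (mnY ≥ v.1 ∧ mnY < v.2) ∨ (mxY > v.1 ∧ mxY ≤ v.2)
    · simp only [pvFindIv] at h
      rw [if_pos hc] at h
      rw [Option.some.injEq] at h
      refine ⟨0, by simp, by omega, by simpa [pvC] using hc, ?_⟩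
      intro m hm; omega
    · simp only [pvFindIv] at h
      rw [if_neg hc] at h
      rw [Option.map_eq_some_iff] at h
      obtain ⟨k', hk', rfl⟩ := h
      obtain ⟨j, hj, rfl, hcj, hmin⟩ := ih k' hk'
      refine ⟨j + 1, by simpa using hj, by push_cast; ring, by simpa using hcj, ?_⟩
      intro m hm
      cases m with
      | zero => intro hx; simp only [List.getElem_cons_zero] at hx; exact hc (by simpa [pvC] using hx)
      | succ m' =>
        have hm' : m' < j := by omega
        intro hx
        exact hmin m' hm' (by simpa using hx)

-- the bridge: on B's interval list (any order with the stated membership, lo-sorted),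
-- the pruned argmin scan returns exactly A's first-fit index (or -1)
theorem pv_scan_eq_findIv (mnY mxY : Int) (hmn : mnY ≤ mxY)
    (lines : List (List (List (Int × Int)) × (Int × Int))) (S : List (Int × Int × Int))
    (hmem : ∀ e : Int × Int × Int, e ∈ S ↔
      ∃ (i : Nat) (h : i < lines.length), e = ((lines[i]).2.1, (lines[i]).2.2, (i : Int)))
    (hsorted : S.Pairwise (fun a b => a.1 ≤ b.1)) :
    pvBScan mnY mxY S (-1) =
      (match pvFindIv mnY mxY (lines.map (fun l => l.2)) with
       | some k => k
       | none => -1) := by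
  have hids : ∀ e ∈ S, 0 ≤ e.2.2 := by
    intro e he
    obtain ⟨i, hi, rfl⟩ := (hmem e).mp he
    positivity
  rw [pv_bscan_eq_scanAll mnY mxY hmn S hsorted]
  obtain ⟨s1, s2, _, s4⟩ := pv_scanAll_spec mnY mxY S (-1) hids
  cases hf : pvFindIv mnY mxY (lines.map (fun l => l.2)) with
  | none =>
    show pvScanAll mnY mxY S (-1) = -1
    have hno : ∀ e ∈ S, ¬ pvC mnY mxY e.1 e.2.1 := by
      intro e he
      obtain ⟨i, hi, rfl⟩ := (hmem e).mp he
      have := pv_findIv_none mnY mxY _ hf (lines[i].2)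
        (List.mem_map.mpr ⟨lines[i], List.getElem_mem hi, rfl⟩)
      simpa using this
    rcases s1 with h | ⟨e, he, hce, -⟩
    · exact h
    · exact absurd hce (hno e he)
  | some k =>
    show pvScanAll mnY mxY S (-1) = k
    obtain ⟨j, hj, rfl, hcj, hmin⟩ := pv_findIv_some mnY mxY _ k hf
    have hjlen : j < lines.length := by simpa using hj
    have hcj' : pvC mnY mxY (lines[j]).2.1 (lines[j]).2.2 := by
      simpa using hcj
    have hej : ((lines[j]).2.1, (lines[j]).2.2, (j : Int)) ∈ S :=
      (hmem _).mpr ⟨j, hjlen, rfl⟩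
    have hr0 : 0 ≤ pvScanAll mnY mxY S (-1) := s4 ⟨_, hej, hcj'⟩
    have hrle : pvScanAll mnY mxY S (-1) ≤ (j : Int) := s2 _ hej hcj'
    rcases s1 with h | ⟨e, he, hce, hve⟩
    · omega
    · obtain ⟨i, hi, rfl⟩ := (hmem e).mp he
      have hilen : i < (lines.map (fun l => l.2)).length := by simpa using hi
      have hji : j ≤ i := by
        by_contra hlt
        exact hmin i (by omega) (by simpa using hce)
      simp only at hve
      omega

-- ---- _insort keeps the interval list lo-sorted and only adds the item ----

theorem pv_insort_mem (xs : List (Int × Int × Int)) (item e : Int × Int × Int) :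
    e ∈ pvInsort xs item ↔ e = item ∨ e ∈ xs := by
  induction xs with
  | nil => simp [pvInsort]
  | cons y rest ih =>
    by_cases h : pvLe3 y item = true
    · simp only [pvInsort, h, if_pos, List.mem_cons, ih]
      try tauto
    · simp only [pvInsort, h, if_neg, Bool.not_eq_true, List.mem_cons]
      try tauto

theorem pv_insort_pairwise (xs : List (Int × Int × Int)) (item : Int × Int × Int)
    (h : xs.Pairwise (fun a b => a.1 ≤ b.1)) :
    (pvInsort xs item).Pairwise (fun a b => a.1 ≤ b.1) := by
  induction xs with
  | nil => simp [pvInsort]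
  | cons y rest ih =>
    rw [List.pairwise_cons] at h
    by_cases hle : pvLe3 y item = true
    · have hyi : y.1 ≤ item.1 := by
        simp only [pvLe3, Bool.or_eq_true, Bool.and_eq_true, decide_eq_true_eq,
          beq_iff_eq] at hle
        omega
      simp only [pvInsort, hle, if_pos]
      refine List.Pairwise.cons ?_ (ih h.2)
      intro z hz
      rcases (pv_insort_mem rest item z).mp hz with rfl | hz'
      · exact hyi
      · exact h.1 z hz'
    · have hiy : item.1 ≤ y.1 := by
        simp only [pvLe3, Bool.or_eq_true, Bool.and_eq_true, decide_eq_true_eq,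
          beq_iff_eq] at hle
        omega
      simp only [pvInsort, hle, if_neg, Bool.not_eq_true]
      refine List.Pairwise.cons ?_ (List.Pairwise.cons h.1 h.2)
      intro z hz
      rcases List.mem_cons.mp hz with rfl | hz'
      · exact hiy
      · exact le_trans hiy (h.1 z hz')

-- ---- integer indexing into the line_lo list ----

theorem pv_pyGetD_append_left (L : List Int) (v : Int) (k d : Int)
    (h0 : 0 ≤ k) (h1 : k < L.length) :
    PySem.List.pyGetD (L ++ [v]) k d = PySem.List.pyGetD L k d := by
  have hk : k = ((k.toNat : Nat) : Int) := by omega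
  rw [hk, PySem.List.pyGetD_natCast, PySem.List.pyGetD_natCast]
  have hlt : k.toNat < L.length := by omega
  rw [List.getD_append _ _ _ _ hlt]

-- ---- the joint loop invariant: B's (by_lo, line_lo, keyed) versus A's lines and the tagging ----

def pvF (lines : List (List (List (Int × Int)) × (Int × Int)))
    (t : (Int × Int) × Int × List (Int × Int)) : (Int × Int × Int × Int) × List (Int × Int) :=
  ((PySem.List.pyGetD (lines.map (fun l => l.2.1)) t.2.1 0, t.2.1, t.1.1, t.1.2), t.2.2)

def pvInv2 (lines : List (List (List (Int × Int)) × (Int × Int)))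
    (tg : List ((Int × Int) × Int × List (Int × Int)))
    (st : List (Int × Int × Int) × List Int × List ((Int × Int × Int × Int) × List (Int × Int))) : Prop :=
  (∀ e : Int × Int × Int, e ∈ st.1 ↔
    ∃ (i : Nat) (h : i < lines.length), e = ((lines[i]).2.1, (lines[i]).2.2, (i : Int))) ∧
  st.1.Pairwise (fun a b => a.1 ≤ b.1) ∧
  st.2.1 = lines.map (fun l => l.2.1) ∧
  st.2.2 = tg.map (pvF lines)

theorem pv_inv2_step (lines : List (List (List (Int × Int)) × (Int × Int)))
    (iv : List (Int × Int)) (tg : List ((Int × Int) × Int × List (Int × Int)))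
    (st : List (Int × Int × Int) × List Int × List ((Int × Int × Int × Int) × List (Int × Int)))
    (letter : List (Int × Int)) (hne : letter ≠ [])
    (h1 : pvInv lines iv tg) (h2 : pvInv2 lines tg st) :
    pvInv2 (pvStepA lines letter) (pvStepT (iv, tg) letter).2 (pvStepB st letter) := by
  obtain ⟨hivA, hgrp, htag⟩ := h1
  obtain ⟨hmem, hsort, hLL, hkeyed⟩ := h2
  set mnY := ((PySem.List.min? letter (fun a => a.2)).getD (0, 0)).2 with hmnY
  set mxY := ((PySem.List.max? letter (fun a => a.2)).getD (0, 0)).2 with hmxY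
  have hmn : mnY ≤ mxY := pv_mn_le_mx letter hne
  have hymin : (PySem.List.min? (letter.map (fun p => p.2)) (fun a => a)).getD 0 = mnY :=
    pv_ys_min letter hne
  have hymax : (PySem.List.max? (letter.map (fun p => p.2)) (fun a => a)).getD 0 = mxY :=
    pv_ys_max letter hne
  have hscan := pv_scan_eq_findIv mnY mxY hmn lines st.1 hmem hsort
  have hlenLL : st.2.1.length = lines.length := by rw [hLL]; simp
  have hlenIv : iv.length = lines.length := by rw [hivA]; simp
  rcases pv_place_find letter mnY mxY lines with ⟨hf, hp⟩ | ⟨j, hj, hf, hp⟩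
  · -- no overlap: a new line is created
    have hb0 : pvBScan mnY mxY st.1 (-1) = -1 := by rw [hscan, hf]
    have hsa : pvStepA lines letter = lines ++ [([letter], (mnY, mxY))] := by
      simp only [pvStepA]; rw [hp]
    have hsb : pvStepT (iv, tg) letter =
        (iv ++ [(mnY, mxY)], tg ++ [(pvMinp letter, (iv.length : Int), letter)]) := by
      simp only [pvStepT]; rw [hivA, hf]
    have hneg : ((-1 : Int) < 0) = True := by simp
    have hsB : pvStepB st letter =
        (pvInsort st.1 (mnY, mxY, (st.2.1.length : Int)),
         st.2.1 ++ [mnY],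
         st.2.2 ++ [((PySem.List.pyGetD (st.2.1 ++ [mnY]) (st.2.1.length : Int) 0,
            (st.2.1.length : Int), (pvMinp letter).1, (pvMinp letter).2), letter)]) := by
      simp only [pvStepB, hymin, hymax, hb0, hneg, if_true, pvMinp]
    rw [hsa, hsb, hsB]
    refine ⟨?_, pv_insort_pairwise _ _ hsort, ?_, ?_⟩
    · intro e
      rw [pv_insort_mem, hmem]
      constructor
      · rintro (rfl | ⟨i, hi, rfl⟩)
        · refine ⟨lines.length, by simp, ?_⟩
          rw [List.getElem_concat_length rfl]
          simp [hlenLL]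
        · refine ⟨i, by simp [Nat.lt_succ_of_lt hi], ?_⟩
          rw [List.getElem_append_left hi]
      · rintro ⟨i, hi, rfl⟩
        simp only [List.length_append, List.length_cons, List.length_nil] at hi
        rcases Nat.lt_or_ge i lines.length with hlt | hge
        · right
          exact ⟨i, hlt, by rw [List.getElem_append_left hlt]⟩
        · left
          have hie : i = lines.length := by omega
          subst hie
          rw [List.getElem_concat_length rfl]
          simp [hlenLL]
    · rw [hLL]
      simp
    · show st.2.2 ++ _ = _
      rw [List.map_append, hkeyed]
      congr 1
      · apply List.map_congr_left
        intro t ht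
        obtain ⟨ht0, ht1, -⟩ := htag t ht
        simp only [pvF, List.map_append, List.map_cons, List.map_nil]
        rw [pv_pyGetD_append_left _ _ _ _ ht0 (by rw [List.length_map]; omega)]
      · simp only [List.map_cons, List.map_nil, pvF, List.map_append]
        have hcast : (iv.length : Int) = (st.2.1.length : Int) := by
          rw [hlenIv, hlenLL]
        rw [← hcast, hLL]
  · -- overlap with line j (A's first fit = B's argmin)
    have hb0 : pvBScan mnY mxY st.1 (-1) = (j : Int) := by rw [hscan, hf]
    have hsa : pvStepA lines letter =
        lines.set j (lines[j].1 ++ [letter], lines[j].2) := by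
      simp only [pvStepA]; rw [hp]
    have hsb : pvStepT (iv, tg) letter =
        (iv, tg ++ [(pvMinp letter, (j : Int), letter)]) := by
      simp only [pvStepT]; rw [hivA, hf]
    have hnneg : ¬ ((j : Int) < 0) := by omega
    have hsB : pvStepB st letter =
        (st.1, st.2.1,
         st.2.2 ++ [((PySem.List.pyGetD st.2.1 (j : Int) 0,
            (j : Int), (pvMinp letter).1, (pvMinp letter).2), letter)]) := by
      simp only [pvStepB, hymin, hymax, hb0, hnneg, if_false, pvMinp]
    rw [hsa, hsb, hsB]
    have hmaplo : (lines.set j (lines[j].1 ++ [letter], lines[j].2)).map (fun l => l.2.1) =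
        lines.map (fun l => l.2.1) := by
      rw [List.map_set]
      have heq : (lines[j].1 ++ [letter], lines[j].2).2.1 =
          (List.map (fun l => l.2.1) lines)[j]'(by simpa using hj) := by simp
      rw [heq, List.set_getElem_self]
    have h2eq : ∀ (i : Nat) (h : i < lines.length),
        ((lines.set j (lines[j].1 ++ [letter], lines[j].2))[i]'(by simpa using h)).2 =
          (lines[i]).2 := by
      intro i h
      by_cases hij : i = j
      · subst hij; rw [List.getElem_set_self]
      · rw [List.getElem_set_ne (Ne.symm hij)]
    refine ⟨?_, hsort, ?_, ?_⟩
    · intro e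
      rw [hmem]
      constructor
      · rintro ⟨i, hi, rfl⟩
        refine ⟨i, by simpa using hi, ?_⟩
        rw [h2eq i hi]
      · rintro ⟨i, hi, rfl⟩
        have hi' : i < lines.length := by simpa using hi
        refine ⟨i, hi', ?_⟩
        rw [h2eq i hi']
    · rw [hLL, hmaplo]
    · show st.2.2 ++ _ = _
      rw [List.map_append, hkeyed]
      congr 1
      · apply List.map_congr_left
        intro t ht
        simp only [pvF, hmaplo]
      · simp only [List.map_cons, List.map_nil, pvF, hmaplo, hLL]

theorem pv_inv2_fold : ∀ (ls : List (List (Int × Int)))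
    (lines : List (List (List (Int × Int)) × (Int × Int)))
    (iv : List (Int × Int)) (tg : List ((Int × Int) × Int × List (Int × Int)))
    (st : List (Int × Int × Int) × List Int × List ((Int × Int × Int × Int) × List (Int × Int))),
    (∀ l ∈ ls, l ≠ []) → pvInv lines iv tg → pvInv2 lines tg st →
    pvInv (ls.foldl pvStepA lines) (ls.foldl pvStepT (iv, tg)).1 (ls.foldl pvStepT (iv, tg)).2 ∧
    pvInv2 (ls.foldl pvStepA lines) (ls.foldl pvStepT (iv, tg)).2 (ls.foldl pvStepB st) := by
  intro ls
  induction ls with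
  | nil => intro lines iv tg st _ h1 h2; exact ⟨h1, h2⟩
  | cons l ls ih =>
    intro lines iv tg st hne h1 h2
    simp only [List.foldl_cons]
    have hstep1 := pv_inv_step lines iv tg l h1
    have hstep2 := pv_inv2_step lines iv tg st l (hne l (by simp)) h1 h2
    have := ih (pvStepA lines l) (pvStepT (iv, tg) l).1 (pvStepT (iv, tg) l).2 (pvStepB st l)
      (fun x hx => hne x (List.mem_cons_of_mem _ hx)) hstep1 hstep2
    simpa using this

theorem pv_inv2_main (letras : List (List (Int × Int))) (hne : Pre_ordenar_letras letras) :
    pvInv (pvLinesA letras) (pvTag letras).1 (pvTag letras).2 ∧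
    pvInv2 (pvLinesA letras) (pvTag letras).2 (letras.foldl pvStepB ([], [], [])) := by
  refine pv_inv2_fold letras [] [] [] ([], [], []) hne ?_ ?_
  · exact ⟨rfl, by intro j hj; simp at hj, by simp⟩
  · refine ⟨?_, by simp, rfl, rfl⟩
    intro e
    simp


-- ---- inserting into a concatenation of bucket chunks ----

theorem pv_insertBy_append_left {α : Type} (b : α → α → Bool) (x : α) (L M : List α)
    (h : ∀ y ∈ L, b x y = false) :
    PySem.List.insertBy b x (L ++ M) = L ++ PySem.List.insertBy b x M := by
  induction L with
  | nil => rfl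
  | cons y ys ih =>
    have hy : b x y = false := h y (by simp)
    simp only [List.cons_append, PySem.List.insertBy, hy, Bool.false_eq_true, if_false]
    rw [ih (fun z hz => h z (List.mem_cons_of_mem _ hz))]

theorem pv_insertBy_middle {α : Type} (b : α → α → Bool) (x : α) (C D : List α)
    (hD : ∀ y ∈ D, b x y = true) :
    PySem.List.insertBy b x (C ++ D) = PySem.List.insertBy b x C ++ D := by
  induction C with
  | nil =>
    simp only [List.nil_append]
    rw [pv_insertBy_all b x D hD]
    rfl
  | cons c cs ih =>
    by_cases hc : b x c = true
    · simp [PySem.List.insertBy, hc]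
    · simp only [List.cons_append, PySem.List.insertBy, hc, Bool.false_eq_true, if_false]
      rw [ih]

-- the bucket decomposition of one stable insertion sort whose comparator
-- strictly separates buckets by their primary key
theorem pvIsort_buckets {α : Type} (b : α → α → Bool) (g : α → Int) (blt : Int → Int → Bool)
    (hbb : ∀ t u, g t ≠ g u → b t u = blt (g t) (g u))
    (hasym : ∀ j k, blt j k = true → blt k j = false)
    (J : List Int) (hJ : J.Pairwise (fun j k => blt j k = true)) :
    ∀ xs : List α, (∀ t ∈ xs, g t ∈ J) →
      pvIsort b xs = J.flatMap (fun j => pvIsort b (xs.filter (fun t => g t == j))) := by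
  have hirr : ∀ j, blt j j = false := by
    intro j
    cases h : blt j j
    · rfl
    · have := hasym j j h
      rw [h] at this
      exact this
  intro xs
  induction xs using List.reverseRecOn with
  | nil => simp [pvIsort]
  | append_singleton xs x ih =>
    intro hmem
    have hx : g x ∈ J := hmem x (by simp)
    have hpre : ∀ t ∈ xs, g t ∈ J := fun t ht => hmem t (by simp [ht])
    have hL : pvIsort b (xs ++ [x]) = PySem.List.insertBy b x (pvIsort b xs) := by
      simp only [pvIsort, List.foldl_append, List.foldl_cons, List.foldl_nil]
    obtain ⟨J1, J2, rfl⟩ := List.append_of_mem hx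
    rw [List.pairwise_append] at hJ
    have hJ1 : ∀ j ∈ J1, blt j (g x) = true := fun j hj => hJ.2.2 j hj (g x) (by simp)
    have hJmid := hJ.2.1
    rw [List.pairwise_cons] at hJmid
    have hJ2 : ∀ k ∈ J2, blt (g x) k = true := fun k hk => hJmid.1 k hk
    have hJ1ne : ∀ j ∈ J1, j ≠ g x := by
      intro j hj he
      have := hJ1 j hj
      rw [he, hirr] at this
      exact (Bool.false_ne_true this)
    have hJ2ne : ∀ k ∈ J2, k ≠ g x := by
      intro k hk he
      have := hJ2 k hk
      rw [he, hirr] at this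
      exact (Bool.false_ne_true this)
    have hfil_ne : ∀ j : Int, j ≠ g x →
        (xs ++ [x]).filter (fun t => g t == j) = xs.filter (fun t => g t == j) := by
      intro j hne2
      rw [List.filter_append]
      have hb : ((fun t => g t == j) x) = false := by
        simp only [beq_eq_false_iff_ne]
        exact fun h => hne2 h.symm
      simp [List.filter, hb]
    have hfil_eq : (xs ++ [x]).filter (fun t => g t == g x) =
        xs.filter (fun t => g t == g x) ++ [x] := by
      rw [List.filter_append]
      simp
    have hB1 : ∀ y ∈ J1.flatMap (fun j => pvIsort b (xs.filter (fun t => g t == j))),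
        b x y = false := by
      intro y hy
      rw [List.mem_flatMap] at hy
      obtain ⟨j, hjJ, hy2⟩ := hy
      have hgy : g y = j := by
        have := pvIsort_mem _ _ _ hy2
        simpa using (List.mem_filter.mp this).2
      have hne2 : g x ≠ g y := by
        rw [hgy]
        exact fun h => hJ1ne j hjJ h.symm
      rw [hbb x y hne2, hgy]
      exact hasym _ _ (hJ1 j hjJ)
    have hB2 : ∀ y ∈ J2.flatMap (fun j => pvIsort b (xs.filter (fun t => g t == j))),
        b x y = true := by
      intro y hy
      rw [List.mem_flatMap] at hy
      obtain ⟨k, hkJ, hy2⟩ := hy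
      have hgy : g y = k := by
        have := pvIsort_mem _ _ _ hy2
        simpa using (List.mem_filter.mp this).2
      have hne2 : g x ≠ g y := by
        rw [hgy]
        exact fun h => hJ2ne k hkJ h.symm
      rw [hbb x y hne2, hgy]
      exact hJ2 k hkJ
    rw [hL, ih hpre, List.flatMap_append, List.flatMap_cons,
      pv_insertBy_append_left b x _ _ hB1, pv_insertBy_middle b x _ _ hB2,
      List.flatMap_append, List.flatMap_cons]
    congr 1
    · refine List.flatMap_congr ?_
      intro j hj
      rw [hfil_ne j (hJ1ne j hj)]
    congr 1
    · rw [hfil_eq]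
      simp only [pvIsort, List.foldl_append, List.foldl_cons, List.foldl_nil]
    · refine List.flatMap_congr ?_
      intro k hk
      rw [hfil_ne k (hJ2ne k hk)]

-- ---- the order in which A emits its lines, as a strictly sorted index list ----

def pvDL : List (List (Int × Int)) × (Int × Int) := ([], (0, 0))

def pvBIdx (letras : List (List (Int × Int))) : Nat → Nat → Bool := fun j k =>
  decide (((pvLinesA letras).getD j pvDL).2.1 < ((pvLinesA letras).getD k pvDL).2.1)

def pvBlo (letras : List (List (Int × Int))) (j : Nat) : Int :=
  ((pvLinesA letras).getD j pvDL).2.1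

def pvBltN (letras : List (List (Int × Int))) (j k : Nat) : Bool :=
  decide (pvBlo letras j < pvBlo letras k) ||
    (pvBlo letras j == pvBlo letras k && decide (j < k))

-- the stable lo-only sort of the indices equals the strict (lo, index) sort
theorem pv_isort_stable_aux (letras : List (List (Int × Int))) :
    ∀ (xs acc : List Nat), xs.Pairwise (· < ·) → (∀ a ∈ acc, ∀ z ∈ xs, a < z) →
      xs.foldl (fun acc x => PySem.List.insertBy (pvBIdx letras) x acc) acc =
        xs.foldl (fun acc x => PySem.List.insertBy (pvBltN letras) x acc) acc := by
  intro xs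
  induction xs with
  | nil => intro acc _ _; rfl
  | cons x t ih =>
    intro acc hp hacc
    rw [List.pairwise_cons] at hp
    simp only [List.foldl_cons]
    have hcong : ∀ y ∈ acc, pvBIdx letras x y = pvBltN letras x y := by
      intro y hy
      have hlt : y < x := hacc y hy x (by simp)
      have hxf : decide (x < y) = false := by simp; omega
      simp only [pvBIdx, pvBltN, pvBlo, hxf, Bool.and_false, Bool.or_false]
      rfl
    rw [pv_congr_insertBy hcong]
    refine ih _ hp.2 ?_
    intro a ha z hz
    rw [PySem.List.mem_insertBy] at ha
    rcases ha with rfl | ha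
    · exact hp.1 z hz
    · exact hacc a ha z (List.mem_cons_of_mem _ hz)

theorem pv_idx_strict (letras : List (List (Int × Int))) (n : Nat) :
    pvIsort (pvBIdx letras) (List.range n) = pvIsort (pvBltN letras) (List.range n) := by
  refine pv_isort_stable_aux letras (List.range n) [] (List.pairwise_lt_range) ?_
  intro a ha
  simp at ha

theorem pvLtOk_bltN (letras : List (List (Int × Int))) : pvLtOk (pvBltN letras) := by
  constructor
  · intro x y z h1 h2
    simp only [pvBltN, Bool.or_eq_true, Bool.and_eq_true, decide_eq_true_eq, beq_iff_eq,
      Bool.or_eq_false_iff, Bool.and_eq_false_iff, decide_eq_false_iff_not,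
      beq_eq_false_iff_ne] at h1 h2 ⊢
    omega
  · intro x y h
    simp only [pvBltN, Bool.or_eq_true, Bool.and_eq_true, decide_eq_true_eq, beq_iff_eq,
      Bool.or_eq_false_iff, Bool.and_eq_false_iff, decide_eq_false_iff_not,
      beq_eq_false_iff_ne] at h ⊢
    omega

theorem pvSrt_isort {α : Type} {b : α → α → Bool} (hok : pvLtOk b) (xs : List α) :
    pvSrt b (pvIsort b xs) := by
  suffices h : ∀ (ys acc : List α), pvSrt b acc →
      pvSrt b (ys.foldl (fun acc x => PySem.List.insertBy b x acc) acc) by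
    exact h xs [] (by simp [pvSrt])
  intro ys
  induction ys with
  | nil => intro acc h; exact h
  | cons y t ih => intro acc h; exact ih _ (pvSrt_insertBy hok y h)

theorem pv_idx_pairwise (letras : List (List (Int × Int))) (n : Nat) :
    (pvIsort (pvBltN letras) (List.range n)).Pairwise
      (fun j k => pvBltN letras j k = true) := by
  have hs : pvSrt (pvBltN letras) (pvIsort (pvBltN letras) (List.range n)) :=
    pvSrt_isort (pvLtOk_bltN letras) _
  have hnd : (pvIsort (pvBltN letras) (List.range n)).Nodup :=
    ((pvIsort_perm _ _).nodup_iff).mpr (List.nodup_range)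
  rw [pvSrt] at hs
  refine (hs.and hnd).imp ?_
  rintro a c ⟨hf, hne⟩
  simp only [pvBltN, Bool.or_eq_false_iff, Bool.and_eq_false_iff, decide_eq_false_iff_not,
    beq_eq_false_iff_ne] at hf
  simp only [pvBltN, Bool.or_eq_true, Bool.and_eq_true, decide_eq_true_eq, beq_iff_eq]
  omega

-- ---- reindexing helpers ----

theorem pv_map_range_getD {α : Type} (l : List α) (d : α) :
    (List.range l.length).map (fun j => l.getD j d) = l := by
  apply List.ext_getElem
  · simp
  · intro i h1 h2
    simp only [List.getElem_map, List.getElem_range]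
    exact List.getD_eq_getElem l d h2

theorem pv_loI_cast (letras : List (List (Int × Int))) (j : Nat) :
    PySem.List.pyGetD ((pvLinesA letras).map (fun l => l.2.1)) ((j : Nat) : Int) 0 =
      pvBlo letras j := by
  rw [PySem.List.pyGetD_natCast]
  by_cases h : j < (pvLinesA letras).length
  · rw [List.getD_eq_getElem _ _ (by simpa using h), List.getElem_map, pvBlo,
      List.getD_eq_getElem _ _ h]
  · rw [List.getD_eq_default _ _ (by simpa using h), pvBlo,
      List.getD_eq_default _ _ (by omega)]
    rfl

theorem pv_lex2_eq (a c b d : Int) :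
    (decide (a < c) || (a == c && decide (b < d))) =
    (decide (a < c) || (!decide (c < a) && decide (b < d))) := by
  by_cases h1 : a < c
  · simp [h1]
  · by_cases h2 : a = c
    · subst h2
      simp
    · have hlt : c < a := by omega
      simp [h1, h2, hlt]

-- ---- A's pipeline in flatMap-over-sorted-indices form ----

theorem pv_A_form (letras : List (List (Int × Int))) (hpre : Pre_ordenar_letras letras) :
    ordenar_letras letras =
      (pvIsort (pvBIdx letras) (List.range (pvLinesA letras).length)).flatMap
        (fun j : Nat => PySem.List.sorted2
          (((pvTag letras).2.filter (fun t => t.2.1 == ((j : Nat) : Int))).map (fun t => t.2.2))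
          (fun a => (pvMinp a).1) (fun a => (pvMinp a).2)) := by
  obtain ⟨⟨hiv, hgrp, htag⟩, hmemI, hsortI, hLL, hkeyed⟩ := pv_inv2_main letras hpre
  have h1 : ordenar_letras letras =
      (pvIsort (fun l m : List (List (Int × Int)) × (Int × Int) => decide (l.2.1 < m.2.1))
        ((pvLinesA letras).map (fun l =>
          (PySem.List.sorted2 l.1 (fun a => (pvMinp a).1) (fun a => (pvMinp a).2), l.2)))).foldl
        (fun acc l => acc ++ l.1) [] := rfl
  have h2 : pvIsort (fun l m : List (List (Int × Int)) × (Int × Int) => decide (l.2.1 < m.2.1))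
      ((pvLinesA letras).map (fun l =>
        (PySem.List.sorted2 l.1 (fun a => (pvMinp a).1) (fun a => (pvMinp a).2), l.2))) =
    (pvIsort (fun l m : List (List (Int × Int)) × (Int × Int) => decide (l.2.1 < m.2.1))
        (pvLinesA letras)).map (fun l =>
      (PySem.List.sorted2 l.1 (fun a => (pvMinp a).1) (fun a => (pvMinp a).2), l.2)) :=
    pvIsort_map _ _ _
  have h4 : pvIsort (fun l m : List (List (Int × Int)) × (Int × Int) => decide (l.2.1 < m.2.1))
      (pvLinesA letras) =
    (pvIsort (pvBIdx letras) (List.range (pvLinesA letras).length)).map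
      (fun j => (pvLinesA letras).getD j pvDL) := by
    conv_lhs => rw [show pvLinesA letras =
      (List.range (pvLinesA letras).length).map (fun j => (pvLinesA letras).getD j pvDL) from
        (pv_map_range_getD _ _).symm]
    exact pvIsort_map _ _ _
  rw [h1, h2, h4, PySem.List.foldl_append_eq_flatMap, List.nil_append, List.map_map,
    List.flatMap_map]
  apply List.flatMap_congr
  intro j hj
  have hjlt : j < (pvLinesA letras).length := by
    have := pvIsort_mem _ _ _ hj
    simpa using this
  show PySem.List.sorted2 ((pvLinesA letras).getD j pvDL).1 _ _ = _
  rw [List.getD_eq_getElem _ _ hjlt, hgrp j hjlt]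

-- ---- B's pipeline in the same form ----

def pvLtI (letras : List (List (Int × Int))) (j k : Int) : Bool :=
  decide (PySem.List.pyGetD ((pvLinesA letras).map (fun l => l.2.1)) j 0 <
          PySem.List.pyGetD ((pvLinesA letras).map (fun l => l.2.1)) k 0) ||
  (PySem.List.pyGetD ((pvLinesA letras).map (fun l => l.2.1)) j 0 ==
      PySem.List.pyGetD ((pvLinesA letras).map (fun l => l.2.1)) k 0 && decide (j < k))

theorem pv_B_form (letras : List (List (Int × Int))) (hpre : Pre_ordenar_letras letras) :
    ordenar_letras_alt letras =
      (pvIsort (pvBIdx letras) (List.range (pvLinesA letras).length)).flatMap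
        (fun j : Nat => PySem.List.sorted2
          (((pvTag letras).2.filter (fun t => t.2.1 == ((j : Nat) : Int))).map (fun t => t.2.2))
          (fun a => (pvMinp a).1) (fun a => (pvMinp a).2)) := by
  obtain ⟨⟨hiv, hgrp, htag⟩, hmemI, hsortI, hLL, hkeyed⟩ := pv_inv2_main letras hpre
  have hivlen : (pvTag letras).1.length = (pvLinesA letras).length := by rw [hiv]; simp
  have h0 : ordenar_letras_alt letras =
      (pvIsort (fun a b => pvLtK a.1 b.1)
        ((letras.foldl pvStepB ([], [], [])).2.2)).map (fun e => e.2) := rfl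
  rw [h0, hkeyed, pvIsort_map, List.map_map]
  have hfun : ((fun e : (Int × Int × Int × Int) × List (Int × Int) => e.2) ∘
      pvF (pvLinesA letras)) = fun t => t.2.2 := rfl
  rw [hfun]
  set bcmp := fun t u : (Int × Int) × Int × List (Int × Int) =>
    pvLtK (pvF (pvLinesA letras) t).1 (pvF (pvLinesA letras) u).1 with hbcmp
  have hbb : ∀ t u : (Int × Int) × Int × List (Int × Int), t.2.1 ≠ u.2.1 →
      bcmp t u = pvLtI letras t.2.1 u.2.1 := by
    intro t u hne
    have hne2 : (t.2.1 == u.2.1) = false := by simpa using hne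
    simp only [hbcmp, pvLtK, pvF, pvLtI, hne2, Bool.false_and, Bool.or_false]
    rfl
  have hasym : ∀ j k : Int, pvLtI letras j k = true → pvLtI letras k j = false := by
    intro j k h
    simp only [pvLtI, Bool.or_eq_true, Bool.and_eq_true, decide_eq_true_eq, beq_iff_eq] at h
    simp only [pvLtI, Bool.or_eq_false_iff, Bool.and_eq_false_iff, decide_eq_false_iff_not,
      beq_eq_false_iff_ne]
    omega
  set JN := pvIsort (pvBIdx letras) (List.range (pvLinesA letras).length) with hJN
  have hJNpw : JN.Pairwise (fun j k => pvBltN letras j k = true) := by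
    rw [hJN, pv_idx_strict]
    exact pv_idx_pairwise letras _
  have hbltcast : ∀ j k : Nat, pvBltN letras j k = true →
      pvLtI letras ((j : Nat) : Int) ((k : Nat) : Int) = true := by
    intro j k h
    simp only [pvLtI, pv_loI_cast]
    simp only [pvBltN] at h
    simpa using h
  have hJpw : (JN.map (fun j : Nat => (j : Int))).Pairwise
      (fun j k => pvLtI letras j k = true) := by
    rw [List.pairwise_map]
    exact hJNpw.imp (by intro a c h; exact hbltcast a c h)
  have hmemJ : ∀ t ∈ (pvTag letras).2, t.2.1 ∈ JN.map (fun j : Nat => (j : Int)) := by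
    intro t ht
    obtain ⟨h0', h1', -⟩ := htag t ht
    have hlt : t.2.1.toNat < (pvLinesA letras).length := by
      rw [← hivlen]
      omega
    have hmemr : t.2.1.toNat ∈ JN := by
      rw [(pvIsort_perm (pvBIdx letras) (List.range (pvLinesA letras).length)).mem_iff]
      exact List.mem_range.mpr hlt
    refine List.mem_map.mpr ⟨t.2.1.toNat, hmemr, by omega⟩
  rw [pvIsort_buckets bcmp (fun t => t.2.1) (pvLtI letras) hbb hasym
    (JN.map (fun j : Nat => (j : Int))) hJpw (pvTag letras).2 hmemJ]
  rw [List.map_flatMap, List.flatMap_map]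
  apply List.flatMap_congr
  intro j hj
  -- within one bucket the comparator is the (min-x, min-y) lexicographic one
  have hbkt : ∀ t ∈ (pvTag letras).2.filter (fun t => t.2.1 == ((j : Nat) : Int)),
      t.2.1 = ((j : Nat) : Int) ∧ t.1 = pvMinp t.2.2 := by
    intro t ht
    obtain ⟨htg, hbeq⟩ := List.mem_filter.mp ht
    exact ⟨by simpa using hbeq, (htag t htg).2.2⟩
  have hcongr : pvIsort bcmp ((pvTag letras).2.filter (fun t => t.2.1 == ((j : Nat) : Int))) =
      pvIsort (fun t u : (Int × Int) × Int × List (Int × Int) =>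
        decide ((pvMinp t.2.2).1 < (pvMinp u.2.2).1) ||
          (!decide ((pvMinp u.2.2).1 < (pvMinp t.2.2).1) &&
            decide ((pvMinp t.2.2).2 < (pvMinp u.2.2).2)))
        ((pvTag letras).2.filter (fun t => t.2.1 == ((j : Nat) : Int))) := by
    refine pvIsort_congr (fun t => t.2.1 = ((j : Nat) : Int) ∧ t.1 = pvMinp t.2.2) ?_ _
      (fun t ht => hbkt t ht)
    intro t u ⟨ht1, ht2⟩ ⟨hu1, hu2⟩
    have : bcmp t u = (decide (t.1.1 < u.1.1) || (t.1.1 == u.1.1 && decide (t.1.2 < u.1.2))) := by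
      simp only [hbcmp, pvLtK, pvF, ht1, hu1]
      simp
      rfl
    rw [this, ht2, hu2, pv_lex2_eq]
  rw [hcongr, pv_sorted2_eq_isort]
  exact (pvIsort_map
    (fun a c => decide ((pvMinp a).1 < (pvMinp c).1) ||
      (!decide ((pvMinp c).1 < (pvMinp a).1) && decide ((pvMinp a).2 < (pvMinp c).2)))
    (fun t => t.2.2) ((pvTag letras).2.filter (fun t => t.2.1 == ((j : Nat) : Int)))).symm

-- ===== VERDICT (by name: the statement is the Claim_ definition above) =====
theorem ordenar_letras_spec : Claim_equal_ordenar_letras := by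
  intro letras _hdom hpre
  show ordenar_letras letras = ordenar_letras_alt letras
  rw [pv_A_form letras hpre, pv_B_form letras hpre]
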